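-- pv_equiv track=rewrite | github.com/azrael1865/Saraphis | independent_core/compression_systems/padic/padic_encoder.py | _find_periodicity
-- ===== SOURCE A (Python) =====
-- from typing import Dict, Any, Optional, Tuple, List
--
-- def _find_periodicity(digits: List[int]) -> Optional[Tuple[int, int]]:
--     """Find periodic pattern in digit sequence"""
--     n = len(digits)
--
--     # Try period lengths from 1 to n/2
--     for period_len in range(1, n // 2 + 1):
--         for start in range(n - 2 * period_len + 1):
--             # Check if pattern repeats
--             is_periodic = True
--             for i in range(period_len):
--                 if digits[start + i] != digits[start + i + period_len]:
--                     is_periodic = False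
--                     break
--
--             if is_periodic:
--                 # Verify it continues to the end
--                 remaining = n - start - 2 * period_len
--                 if remaining == 0 or all(
--                     digits[start + (i % period_len)] == digits[start + 2 * period_len + i]
--                     for i in range(remaining)
--                 ):
--                     return (start, period_len)
--
--     return None
-- ===== SOURCE B (Python) =====
-- from typing import Optional, Tuple, List
--
-- def _find_periodicity(digits: List[int]) -> Optional[Tuple[int, int]]:
--     """Find periodic pattern in digit sequence.
--
--     For each candidate period p (smallest first), scan once from the right for
--     the last index j with digits[j] != digits[j+p]; the smallest start from
--     which the tail is p-periodic is j+1 (or 0 if there is no mismatch).  The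
--     start is valid iff it leaves room for at least two full periods.
--     """
--     n = len(digits)
--     for p in range(1, n // 2 + 1):
--         start = 0
--         for j in range(n - p - 1, -1, -1):
--             if digits[j] != digits[j + p]:
--                 start = j + 1
--                 break
--         if start <= n - 2 * p:
--             return (start, p)
--     return None
-- ===== Notes on version B (the rewrite author's own statement) =====
-- stated objective: faster
-- what changed: Per candidate period p, instead of trying every start and re-verifying periodicity forward from it, B scans once right-to-left for the last index j with digits[j] != digits[j+p]; j+1 is the smallest valid start, accepted iff it leaves room for two periods.
import Mathlib
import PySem

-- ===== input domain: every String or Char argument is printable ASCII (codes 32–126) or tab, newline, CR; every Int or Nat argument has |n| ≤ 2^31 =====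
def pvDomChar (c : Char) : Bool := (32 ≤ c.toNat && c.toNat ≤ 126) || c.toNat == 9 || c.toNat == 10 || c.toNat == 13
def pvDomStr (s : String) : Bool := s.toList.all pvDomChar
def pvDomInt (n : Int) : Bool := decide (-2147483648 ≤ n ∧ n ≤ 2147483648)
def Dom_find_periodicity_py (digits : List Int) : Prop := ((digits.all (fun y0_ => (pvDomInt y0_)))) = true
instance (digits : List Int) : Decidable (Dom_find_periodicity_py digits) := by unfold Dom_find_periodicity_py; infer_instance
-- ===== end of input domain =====

-- B replaces A's per-period inner scan-with-reverification by one right-to-left scan for the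
-- last mismatch (start = last mismatch + 1): an alternative algorithm, same results.

-- ===== PORT A =====
-- digits[idx]: every index either program reads is in range (0 ≤ idx < len), so pyGetD 0 is exact there
def pvGet (d : List Int) (i : Int) : Int := PySem.List.pyGetD d i 0

-- 'for i in range(period_len): if digits[start+i] != digits[start+i+period_len]: is_periodic = False; break'
def pvAChk (d : List Int) (s p : Int) : Nat → Int → Bool
  | 0, _ => true
  | k+1, i =>
    if pvGet d (s + i) ≠ pvGet d (s + i + p) then false
    else pvAChk d s p k (i + 1)

-- 'all(digits[start + (i % period_len)] == digits[start + 2*period_len + i] for i in range(remaining))'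
def pvARem (d : List Int) (s p : Int) : Nat → Int → Bool
  | 0, _ => true
  | k+1, i =>
    (pvGet d (s + PySem.Int.mod i p) == pvGet d (s + 2*p + i)) && pvARem d s p k (i + 1)

-- 'for start in range(n - 2*period_len + 1)'
def pvAStart (d : List Int) (n p : Int) : Nat → Int → Option (Int × Int)
  | 0, _ => none
  | k+1, s =>
    if pvAChk d s p p.toNat 0 then
      if ((n - s - 2*p) == 0) || pvARem d s p (n - s - 2*p).toNat 0 then some (s, p)
      else pvAStart d n p k (s + 1)
    else pvAStart d n p k (s + 1)

-- 'for period_len in range(1, n // 2 + 1)'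
def pvAPer (d : List Int) (n : Int) : Nat → Int → Option (Int × Int)
  | 0, _ => none
  | k+1, p =>
    match pvAStart d n p (n - 2*p + 1).toNat 0 with
    | some r => some r
    | none => pvAPer d n k (p + 1)

def find_periodicity_py (digits : List Int) : Option (Int × Int) :=
  pvAPer digits digits.length (PySem.Int.floordiv digits.length 2).toNat 1

-- ===== PORT B =====
-- 'for j in range(n - p - 1, -1, -1): if digits[j] != digits[j+p]: start = j + 1; break'
def pvBScan (d : List Int) (p : Int) : Nat → Int → Int
  | 0, _ => 0
  | k+1, j =>
    if pvGet d j ≠ pvGet d (j + p) then j + 1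
    else pvBScan d p k (j - 1)

-- 'for p in range(1, n // 2 + 1): start = <scan>; if start <= n - 2*p: return (start, p)'
def pvBPer (d : List Int) (n : Int) : Nat → Int → Option (Int × Int)
  | 0, _ => none
  | k+1, p =>
    let start := pvBScan d p (n - p).toNat (n - p - 1)
    if start ≤ n - 2*p then some (start, p) else pvBPer d n k (p + 1)

def find_periodicity_py_alt (digits : List Int) : Option (Int × Int) :=
  pvBPer digits digits.length (PySem.Int.floordiv digits.length 2).toNat 1

-- ===== PRECONDITION & SPEC =====
def Spec_find_periodicity_py (digits : List Int) (out : Option (Int × Int)) : Prop := out = find_periodicity_py_alt digits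
instance (digits : List Int) (out : Option (Int × Int)) : Decidable (Spec_find_periodicity_py digits out) := by unfold Spec_find_periodicity_py; infer_instance

-- ===== CLAIM (what is proved, stated in full; the proofs are below) =====
def Claim_equal_find_periodicity_py : Prop := ∀ (digits : List Int), Dom_find_periodicity_py digits → Spec_find_periodicity_py digits (find_periodicity_py digits)

-- ===== LEMMAS AND PROOFS =====

lemma pvAChk_iff (d : List Int) (s p : Int) : ∀ (k : Nat) (i : Int),
    pvAChk d s p k i = true ↔
      ∀ t : Int, 0 ≤ t → t < (k : Int) → pvGet d (s + i + t) = pvGet d (s + i + t + p) := by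
  intro k
  induction k with
  | zero => intro i; simp [pvAChk]; intro t h0 h1; omega
  | succ k ih =>
    intro i
    rw [pvAChk]
    split_ifs with h
    · simp only [false_iff]
      intro hall
      exact h (by simpa using hall 0 le_rfl (by push_cast; omega))
    · have h := not_ne_iff.mp h
      rw [ih (i + 1)]
      constructor
      · intro hr t h0 h1
        rcases eq_or_lt_of_le h0 with h0' | h0'
        · simpa [← h0'] using h
        · have := hr (t - 1) (by omega) (by push_cast at h1 ⊢; omega)
          have e : s + (i + 1) + (t - 1) = s + i + t := by ring
          rw [e] at this; exact this
      · intro hr t h0 h1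
        have := hr (t + 1) (by omega) (by push_cast at h1 ⊢; omega)
        have e : s + i + (t + 1) = s + (i + 1) + t := by ring
        rw [e] at this; exact this

lemma pvARem_iff (d : List Int) (s p : Int) : ∀ (k : Nat) (i : Int),
    pvARem d s p k i = true ↔
      ∀ t : Int, 0 ≤ t → t < (k : Int) →
        pvGet d (s + PySem.Int.mod (i + t) p) = pvGet d (s + 2*p + (i + t)) := by
  intro k
  induction k with
  | zero => intro i; simp [pvARem]; intro t h0 h1; omega
  | succ k ih =>
    intro i
    rw [pvARem, Bool.and_eq_true, beq_iff_eq, ih (i + 1)]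
    constructor
    · rintro ⟨h, hr⟩ t h0 h1
      rcases eq_or_lt_of_le h0 with h0' | h0'
      · simpa [← h0'] using h
      · have := hr (t - 1) (by omega) (by push_cast at h1 ⊢; omega)
        have e : i + 1 + (t - 1) = i + t := by ring
        rw [e] at this; exact this
    · intro hr
      refine ⟨by simpa using hr 0 le_rfl (by push_cast; omega), ?_⟩
      intro t h0 h1
      have := hr (t + 1) (by omega) (by push_cast at h1 ⊢; omega)
      have e : i + (t + 1) = i + 1 + t := by ring
      rw [e] at this; exact this

-- abstract both-checks ↔ tail-periodicity-from-s lemma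
lemma periodic_iff (f : Int → Int) (p s n : Int) (hp : 1 ≤ p) (h2 : s + 2*p ≤ n) :
    ((∀ t : Int, 0 ≤ t → t < p → f (s + t) = f (s + t + p)) ∧
     (∀ t : Int, 0 ≤ t → t < n - s - 2*p → f (s + t % p) = f (s + 2*p + t)))
    ↔ (∀ j : Int, s ≤ j → j + p < n → f j = f (j + p)) := by
  constructor
  · rintro ⟨h1, h2'⟩
    have C2 : ∀ t : Int, 0 ≤ t → s + t < n → f (s + t) = f (s + t % p) := by
      intro t h0 htn
      rcases lt_or_ge t p with hlt | hge
      · rw [Int.emod_eq_of_lt h0 hlt]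
      · rcases lt_or_ge t (2*p) with hlt2 | hge2
        · have e0 : (t - p) % p = t % p := by
            rw [show t - p = t + p * (-1) by ring, Int.add_mul_emod_self_left]
          have e1 : t % p = t - p := by
            rw [← e0]; exact Int.emod_eq_of_lt (by omega) (by omega)
          have h := h1 (t - p) (by omega) (by omega)
          rw [show s + (t - p) + p = s + t by ring] at h
          rw [e1]; exact h.symm
        · have h := h2' (t - 2*p) (by omega) (by omega)
          have e1 : (t - 2*p) % p = t % p := by
            rw [show t - 2*p = t + p * (-2) by ring, Int.add_mul_emod_self_left]
          rw [e1, show s + 2*p + (t - 2*p) = s + t by ring] at h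
          exact h.symm
    intro j hj hjn
    have a1 := C2 (j - s) (by omega) (by omega)
    have a2 := C2 (j - s + p) (by omega) (by omega)
    rw [show s + (j - s) = j by ring] at a1
    rw [show s + (j - s + p) = j + p by ring,
        show j - s + p = (j - s) + p * 1 by ring, Int.add_mul_emod_self_left] at a2
    exact a1.trans a2.symm
  · intro V
    have C : ∀ m : Nat, s + (m : Int) < n → f (s + (m : Int)) = f (s + (m : Int) % p) := by
      intro m
      induction m using Nat.strong_induction_on with
      | _ m ih =>
        intro hmn
        rcases lt_or_ge ((m : Int)) p with hlt | hge
        · rw [Int.emod_eq_of_lt (by positivity) hlt]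
        · have hc : ((m - p.toNat : Nat) : Int) = (m : Int) - p := by omega
          have hV := V (s + ((m - p.toNat : Nat) : Int)) (by omega) (by omega)
          have hih := ih (m - p.toNat) (by omega) (by omega)
          have e2 : ((m - p.toNat : Nat) : Int) % p = (m : Int) % p := by
            rw [hc, show (m : Int) - p = (m : Int) + p * (-1) by ring,
                Int.add_mul_emod_self_left]
          rw [e2] at hih
          rw [show s + (m : Int) = s + ((m - p.toNat : Nat) : Int) + p by omega]
          exact hV.symm.trans hih
    refine ⟨fun t h0 h1 => V (s + t) (by omega) (by omega), ?_⟩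
    intro t h0 h1
    have hc : (((2*p + t).toNat : Nat) : Int) = 2*p + t := by omega
    have h := C (2*p + t).toNat (by omega)
    rw [hc, show (2*p + t) % p = t % p by
          rw [show 2*p + t = t + p * 2 by ring, Int.add_mul_emod_self_left],
        show s + (2*p + t) = s + 2*p + t by ring] at h
    exact h.symm

lemma pvBScan_spec (d : List Int) (p : Int) : ∀ (k : Nat) (j : Int), j + 1 = (k : Int) →
    0 ≤ pvBScan d p k j ∧ pvBScan d p k j ≤ j + 1 ∧
    (∀ j' : Int, pvBScan d p k j ≤ j' → j' ≤ j → pvGet d j' = pvGet d (j' + p)) ∧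
    (pvBScan d p k j = 0 ∨ pvGet d (pvBScan d p k j - 1) ≠ pvGet d (pvBScan d p k j - 1 + p)) := by
  intro k
  induction k with
  | zero =>
    intro j hj
    refine ⟨le_rfl, by simp [pvBScan]; omega, ?_, Or.inl rfl⟩
    intro j' h1 h2
    simp [pvBScan] at h1
    omega
  | succ k ih =>
    intro j hj
    rw [pvBScan]
    split_ifs with h
    · exact ⟨by omega, le_rfl, fun j' h1 h2 => absurd rfl (by omega : j' ≠ j'),
        Or.inr (by simpa using h)⟩
    · have h := not_ne_iff.mp h
      obtain ⟨i1, i2, i3, i4⟩ := ih (j - 1) (by push_cast at hj ⊢; omega)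
      refine ⟨i1, by omega, ?_, i4⟩
      intro j' h1 h2
      rcases eq_or_lt_of_le h2 with h2' | h2'
      · rw [h2']; exact h
      · exact i3 j' h1 (by omega)

lemma pvAStart_eq (d : List Int) (n p r : Int) (hp : 1 ≤ p)
    (hrn : r ≤ n - p)
    (hH1 : ∀ j' : Int, r ≤ j' → j' ≤ n - p - 1 → pvGet d j' = pvGet d (j' + p))
    (hH2 : r = 0 ∨ pvGet d (r - 1) ≠ pvGet d (r - 1 + p)) :
    ∀ (k : Nat) (s : Int), 0 ≤ s → s + (k : Int) = n - 2*p + 1 → s ≤ r →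
      pvAStart d n p k s = if r ≤ n - 2*p then some (r, p) else none := by
  intro k
  induction k with
  | zero =>
    intro s hs0 hsk hsr
    rw [pvAStart, if_neg (by push_cast at hsk; omega)]
  | succ k ih =>
    intro s hs0 hsk hsr
    have hs2 : s + 2*p ≤ n := by push_cast at hsk; omega
    have e1 : pvAChk d s p p.toNat 0 = true ↔
        ∀ t : Int, 0 ≤ t → t < p → pvGet d (s + t) = pvGet d (s + t + p) := by
      rw [pvAChk_iff]
      constructor
      · intro h t h0 h1
        have h2 := h t h0 (by omega)
        rw [show s + 0 + t = s + t by ring] at h2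
        exact h2
      · intro h t h0 h1
        rw [show s + 0 + t = s + t by ring]
        exact h t h0 (by omega)
    have e2 : (((n - s - 2*p) == 0) || pvARem d s p (n - s - 2*p).toNat 0) = true ↔
        ∀ t : Int, 0 ≤ t → t < n - s - 2*p →
          pvGet d (s + t % p) = pvGet d (s + 2*p + t) := by
      rw [Bool.or_eq_true, beq_iff_eq, pvARem_iff]
      constructor
      · rintro (h | h) t h0 h1
        · exact absurd h1 (by omega)
        · have h2 := h t h0 (by omega)
          rw [zero_add, PySem.Int.mod_eq_emod_of_pos (by omega)] at h2
          exact h2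
      · intro h
        right
        intro t h0 h1
        rw [zero_add, PySem.Int.mod_eq_emod_of_pos (by omega)]
        exact h t h0 (by omega)
    have hAcc := (e1.and e2).trans (periodic_iff (pvGet d) p s n hp hs2)
    rw [pvAStart]
    rcases eq_or_lt_of_le hsr with he | hlt
    · obtain ⟨c1, c2⟩ := hAcc.mpr (fun j h1 h2 => hH1 j (by omega) (by omega))
      rw [if_pos c1, if_pos c2, if_pos (by omega : r ≤ n - 2*p), he]
    · have hnval : ¬ ∀ j : Int, s ≤ j → j + p < n → pvGet d j = pvGet d (j + p) := by
        intro hv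
        rcases hH2 with h0 | hne
        · omega
        · exact hne (hv (r - 1) (by omega) (by omega))
      have hrec := ih (s + 1) (by omega) (by push_cast at hsk ⊢; omega) (by omega)
      by_cases c1 : pvAChk d s p p.toNat 0 = true
      · by_cases c2 : (((n - s - 2*p) == 0) || pvARem d s p (n - s - 2*p).toNat 0) = true
        · exact absurd (hAcc.mp ⟨c1, c2⟩) hnval
        · rw [if_pos c1, if_neg c2]; exact hrec
      · rw [if_neg c1]; exact hrec

lemma pvPer_eq (d : List Int) : ∀ (k : Nat) (q : Int), 1 ≤ q →
    q + (k : Int) = PySem.Int.floordiv d.length 2 + 1 →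
    pvAPer d d.length k q = pvBPer d d.length k q := by
  have hfd : PySem.Int.floordiv (d.length : Int) 2 = (d.length : Int) / 2 :=
    PySem.Int.floordiv_eq_ediv_of_pos (by omega)
  intro k
  induction k with
  | zero => intro q h1 h2; rfl
  | succ k ih =>
    intro q h1 h2
    rw [hfd] at h2
    have hq2 : 2*q ≤ (d.length : Int) := by push_cast at h2; omega
    obtain ⟨b0, b1, b2, b3⟩ :=
      pvBScan_spec d q ((d.length : Int) - q).toNat ((d.length : Int) - q - 1) (by omega)
    have hA := pvAStart_eq d (d.length : Int) q
      (pvBScan d q ((d.length : Int) - q).toNat ((d.length : Int) - q - 1)) h1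
      (by omega) b2 b3 ((d.length : Int) - 2*q + 1).toNat 0 le_rfl (by omega) b0
    rw [pvAPer, pvBPer, hA]
    by_cases hc : pvBScan d q ((d.length : Int) - q).toNat ((d.length : Int) - q - 1)
        ≤ (d.length : Int) - 2*q
    · rw [if_pos hc, if_pos hc]
    · rw [if_neg hc, if_neg hc]
      exact ih (q + 1) (by omega) (by rw [hfd]; push_cast at h2 ⊢; omega)

-- ===== VERDICT (by name: the statement is the Claim_ definition above) =====
theorem find_periodicity_py_spec : Claim_equal_find_periodicity_py := by
  intro digits _
  unfold Spec_find_periodicity_py find_periodicity_py find_periodicity_py_alt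
  have h2 : PySem.Int.floordiv (digits.length : Int) 2 = (digits.length : Int) / 2 :=
    PySem.Int.floordiv_eq_ediv_of_pos (by omega)
  refine pvPer_eq digits _ 1 le_rfl ?_
  rw [Int.toNat_of_nonneg (by rw [h2]; positivity)]
  omega
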